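/-
  ARITHMETIC AND LAYOUT SIDE GOALS IN ONE CALL, and hypotheses opened into their leaves.

      u_open h₁ h₂ …      put the LEAVES of the given hypotheses into the context: conjunctions and Prop-valued structures (a
                          contract's precondition, a loop invariant, `AtEntry`, `Returned`) are opened recursively; the field
                          `rip` of `he` becomes the hypothesis `he_rip`. One line per cut point; `u_walk` then sees the facts.
      u_omega             closes an arithmetic goal over words and numbers: keeps only the ARITHMETIC hypotheses (everything
                          else — code in memory, frames, contracts — is cleared first), unfolds `Layout.Has`, `Layout.lo`,
                          `Span.Disj`, `Span.Has`, `Mem.NoWrap`, adds `L.hi ≤ 40000000H` for every layout of the context, and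
                          calls `word_omega`'s normaliser once and `omega` — first WITHOUT the disjunctive hypotheses (each one
                          doubles omega's case split), then with each single one, then with pairs, then with all
      u_omega_lin         the same without ever adding a case-splitting hypothesis: ONE `omega` run (what a walk uses to prune
                          an infeasible branch: cheap when it fails)

  Ported from the older proof layer (proofs.v3/X86V3/Open.lean: `v3_open`, `v3_omega`), over `User.State` / `User.Mem`.
-/
import UserX.Basic
import Word.Arith
import Lean

namespace UserX
open Lean Meta Elab Tactic

/-- Structures that `u_open` does not open (logic, not records of facts). -/
def openSkip : List Name := [``Iff, ``Exists, ``Subtype, ``PProd, ``Prod, ``Eq, ``HEq]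

/-- The leaves of a proof `pf : ty`: conjunctions and Prop-valued structures opened, at most `depth` levels. Each leaf comes
with the name built from the field names on the way. -/
partial def openProp (pf ty : Expr) (nm : String) (depth : Nat) : MetaM (Array (String × Expr × Expr)) := do
  let ty ← instantiateMVars ty
  if depth == 0 then
    return #[(nm, pf, ty)]
  let ty' ← whnfR ty
  if ty'.isAppOfArity ``And 2 then
    let left ← openProp (← mkAppM ``And.left #[pf]) (ty'.getArg! 0) (nm ++ "_1") (depth - 1)
    let right ← openProp (← mkAppM ``And.right #[pf]) (ty'.getArg! 1) (nm ++ "_2") (depth - 1)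
    return left ++ right
  let .const structName _ := ty'.getAppFn | return #[(nm, pf, ty)]
  let env ← getEnv
  if openSkip.contains structName || !isStructure env structName then
    return #[(nm, pf, ty)]
  unless (← isProp ty') do
    return #[(nm, pf, ty)]
  let mut out := #[]
  for field in getStructureFields env structName do
    let proj ← mkProjection pf field
    let projTy ← instantiateMVars (← inferType proj)
    out := out ++ (← openProp proj projTy.headBeta (nm ++ "_" ++ field.toString) (depth - 1))
  return out

/-- `u_open h₁ h₂ …`: the leaves of the hypotheses, as hypotheses `h_field`. -/
elab "u_open " hs:(ppSpace colGt term:max)+ : tactic => withMainContext do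
  let mut g ← getMainGoal
  for h in hs do
    let (leaves, nm) ← g.withContext do
      let pf ← Lean.Elab.Term.elabTerm h none |>.run'
      let pf ← instantiateMVars pf
      let ty ← inferType pf
      let nm : String := match h.raw with
        | .ident _ _ v _ => v.toString.replace "." "_"
        | _ => "h"
      let leaves ← openProp pf ty nm 4
      pure (leaves, nm)
    -- a leaf that is already a hypothesis of that name: nothing to add
    let isPlainHyp := h.raw.isIdent && ((← g.withContext getLCtx).findFromUserName? h.raw.getId).isSome
    if leaves.size == 1 && leaves[0]!.1 == nm && isPlainHyp then
      continue
    for (n, p, t) in leaves do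
      -- projections of structure updates are reduced in the statement of the leaf
      let t' ← try (do let r ← Lean.Meta.dsimp t (← Simp.mkContext (simpTheorems := #[])); pure r.1) catch _ => pure t
      let (_, g') ← (← g.assert (Name.mkSimple n) t' p).intro1P
      g := g'
  replaceMainGoal [g]

/-- Numeric carrier types. -/
def isNumTy (α : Expr) : MetaM Bool := do
  let α ← whnfR α
  return α.isConstOf ``Nat || α.isConstOf ``Int || α.isConstOf ``UInt8 || α.isConstOf ``UInt16 || α.isConstOf ``UInt32 ||
    α.isConstOf ``UInt64

/-- Is `e` a proposition `word_omega` can use: (in)equalities over numbers and words, their Boolean combinations, and the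
layer's range facts? -/
partial def isArith (e : Expr) : MetaM Bool := do
  let e ← instantiateMVars e
  let e := e.consumeMData
  if e.isConstOf ``True || e.isConstOf ``False then
    return true
  if e.isAppOfArity ``And 2 || e.isAppOfArity ``Or 2 || e.isAppOfArity ``Iff 2 then
    return (← isArith (e.getArg! 0)) && (← isArith (e.getArg! 1))
  if e.isAppOfArity ``Not 1 then
    return ← isArith (e.getArg! 0)
  if e.isAppOfArity ``Eq 3 || e.isAppOfArity ``Ne 3 then
    return ← isNumTy (e.getArg! 0)
  if e.isAppOfArity ``LE.le 4 || e.isAppOfArity ``LT.lt 4 || e.isAppOfArity ``GE.ge 4 || e.isAppOfArity ``GT.gt 4 then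
    return ← isNumTy (e.getArg! 0)
  if e.isAppOfArity ``Dvd.dvd 4 then
    return ← isNumTy (e.getArg! 0)
  if e.isAppOf ``X86.User.Layout.Has || e.isAppOf ``X86.User.Span.Disj || e.isAppOf ``X86.User.Span.Has ||
      e.isAppOf ``X86.User.Mem.NoWrap || e.isAppOf ``X86.User.Layout.user then
    return true
  if e.isArrow then
    let a := e.bindingDomain!
    if (← isProp a) then
      return (← isArith a) && (← isArith e.bindingBody!)
  return false

end UserX

open Lean Meta Simp in
/-- `UInt64.toNat <numeral>` as a `Nat` literal, also when the numeral is typed `Word` (an abbreviation: core's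
`UInt64.reduceToNat` looks for the type name `UInt64` and misses it). -/
simproc_decl UserX.reduceToNatWord (UInt64.toNat _) := fun e => do
  unless e.isAppOfArity ``UInt64.toNat 1 do
    return .continue
  let x := e.appArg!.consumeMData
  unless x.isAppOfArity ``OfNat.ofNat 3 do
    return .continue
  let ty ← whnfR (x.getArg! 0)
  unless ty.isConstOf ``UInt64 do
    return .continue
  let some n := (x.getArg! 1).rawNatLit? | return .continue
  let r := mkNatLit (n % 2 ^ 64)
  let prf ← mkDecideProof (← mkEq e r)
  return .done { expr := r, proof? := some prf }

/-- The normalising call of `u_omega`, ONCE, on a context that holds arithmetic facts only: the layer's range predicates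
unfolded, `toNat` pushed through the word operations (`word_push`), the `toNat` bounds added. What is left is for `omega`. -/
macro "u_arith_norm" : tactic => `(tactic| (
  try simp only [X86.User.Layout.Has, X86.User.Layout.user, X86.User.Layout.lo, X86.User.Span.Disj, X86.User.Span.Has,
    X86.User.Mem.NoWrap, ge_iff_le, gt_iff_lt, UserX.reduceToNatWord] at *
  all_goals (try word_nowrap at *)
  all_goals (try word_push at *)
  all_goals (try simp only [not_true_eq_false, not_false_eq_true] at *)
  all_goals word_bounds))

namespace UserX
open Lean Meta Elab Tactic

/-- All sub-lists of size `k`. -/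
def subsetsOfSize {α} : List α → Nat → List (List α)
  | _, 0 => [[]]
  | [], _ + 1 => []
  | x :: xs, k + 1 => (subsetsOfSize xs k).map (x :: ·) ++ subsetsOfSize xs (k + 1)

/-- The "atoms" of an arithmetic proposition, for relevance: its variables (states, memories and flags excepted: every fact
mentions them) and its register reads `v.reg r`. -/
partial def atomKeys (e : Expr) : MetaM (List Expr) := do
  let out : IO.Ref (List Expr) ← IO.mkRef []
  let rec go (e : Expr) : MetaM Unit := do
    let e := e.consumeMData
    if e.isAppOfArity ``X86.User.State.reg 2 then
      out.modify fun l => if l.contains e then l else e :: l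
    else if e.isFVar then
      let ty ← whnfR (← inferType e)
      let isCarrier := ty.isConstOf ``X86.User.State || ty.isConstOf ``X86.User.Mem || ty.isConstOf ``X86.Flags
      unless isCarrier || (← isProp ty) do
        out.modify fun l => if l.contains e then l else e :: l
    else
      match e with
      | .app f a =>
        go f
        go a
      | .lam _ t b _ | .forallE _ t b _ =>
        go t
        unless b.hasLooseBVars do go b
      | .letE _ t v b _ =>
        go t
        go v
        unless b.hasLooseBVars do go b
      | .mdata _ b | .proj _ _ b => go b
      | _ => pure ()
  go e
  out.get

/-- Is the (normalised) hypothesis one that makes `omega` split cases? -/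
partial def splitsCases (e : Expr) : Bool :=
  let e := e.consumeMData
  e.isAppOfArity ``Or 2 || (e.isAppOfArity ``And 2 && (splitsCases (e.getArg! 0) || splitsCases (e.getArg! 1))) ||
  (e.isArrow && !e.bindingBody!.hasLooseBVars && !e.bindingBody!.isConstOf ``False)

/-- The procedure of `u_omega` (`linOnly`: no case-splitting hypothesis is ever added: one `omega` run). -/
def omegaCore (linOnly : Bool) : TacticM Unit := withMainContext do
  let g0 ← getMainGoal
  let rest := (← getGoals).drop 1
  -- 0. every layout of the context ends below 1 GB
  let mut gl := g0
  for d in ← getLCtx do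
    if d.isImplementationDetail then continue
    let ty ← whnfR (← instantiateMVars d.type)
    if ty.isConstOf ``X86.User.Layout then
      let pf ← mkAppM ``X86.User.Layout.hi_le #[d.toExpr]
      let (_, g') ← (← gl.assert `_layoutHi (← inferType pf) pf).intro1P
      gl := g'
  let g := gl
  -- 1. keep the arithmetic hypotheses only
  let drop ← g.withContext do
    let mut drop : Array FVarId := #[]
    for d in ← getLCtx do
      if d.isImplementationDetail then continue
      let ty ← instantiateMVars d.type
      unless (← isProp ty) do continue
      unless ← isArith ty do
        drop := drop.push d.fvarId
    pure drop
  let g ← g.tryClearMany drop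
  -- 2. normalise once
  setGoals [g]
  evalTactic (← `(tactic| u_arith_norm))
  let gs ← getUnsolvedGoals
  if gs.isEmpty then
    setGoals rest
    return
  let [g] := gs | throwError "u_omega: normalisation left {gs.length} goals"
  -- 3. omega, with as few case-splitting hypotheses as possible
  let disj ← g.withContext do
    let mut disj : Array FVarId := #[]
    for d in ← getLCtx do
      if d.isImplementationDetail then continue
      let ty ← instantiateMVars d.type
      if (← isProp ty) && splitsCases ty then
        disj := disj.push d.fvarId
    pure disj
  -- A goal that is a DISJUNCTION over a shifted word, `a ≤ ((w - k) >>> 3 + c).toNat ∨ ((w - k) >>> 3 + c).toNat + 4 ≤ a` (a stack slot against a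
  -- shadow byte: every protected prologue / epilogue), is left by the normaliser with `(2^64 - k + w.toNat) % 2^64 / 8`, on which `omega` fails
  -- although it closes each disjunct alone. For such a goal, and only after plain `omega` has failed, the exactness pass `word_exact` (Word/Arith.lean)
  -- is run before a second `omega`.
  let goalIsOr := (← instantiateMVars (← g.getType)).consumeMData.isAppOfArity ``Or 2
  let attempt (keep : List FVarId) : TacticM Bool := do
    let s ← saveState
    try
      let g' ← g.tryClearMany (disj.filter fun f => !keep.contains f)
      setGoals [g']
      if goalIsOr then
        evalTactic (← `(tactic| first | omega | (word_exact; omega)))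
      else
        evalTactic (← `(tactic| omega))
      if (← getUnsolvedGoals).isEmpty then
        return true
      s.restore
      return false
    catch _ =>
      s.restore
      return false
  -- the case-splitting hypotheses most related to the goal first; pairs among the best four only
  let dl ← g.withContext do
    let gk ← atomKeys (← instantiateMVars (← g.getType))
    let scored ← disj.toList.mapM fun f => do
      let k ← atomKeys (← instantiateMVars (← f.getType))
      pure (f, (k.filter fun x => gk.contains x).length)
    pure ((scored.toArray.qsort fun a b => a.2 > b.2).toList.map (·.1))
  if ← attempt [] then
    setGoals rest
    return
  if linOnly then
    throwError "u_omega_lin: could not close the goal without the case-splitting hypotheses"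
  for f in dl do
    if ← attempt [f] then
      setGoals rest
      return
  for sub in subsetsOfSize (dl.take 4) 2 do
    if ← attempt sub then
      setGoals rest
      return
  if dl.length > 2 then
    if ← attempt dl then
      setGoals rest
      return
  throwError "u_omega: could not close the goal (case-splitting hypotheses: {dl.length})"

/-- `u_omega`: see the file header. -/
elab "u_omega" : tactic => omegaCore false

/-- `u_omega` without the case-splitting hypotheses: ONE `omega` run. -/
elab "u_omega_lin" : tactic => omegaCore true

end UserX
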